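-- pv_equiv track=rewrite | github.com/Deufel/py-sse | src/py_sse/sse.py | execute_script
-- ===== SOURCE A (Python) =====
-- def execute_script(
--     script: str,  # JavaScript to execute
--     auto_remove: bool = True  # remove script element after execution
-- ) -> str:  # formatted SSE event string
--     "Format a datastar-execute-script SSE event"
--     lines = []
--     if not auto_remove: lines.append('data: autoRemove false')
--     for line in script.split('\n'): lines.append(f'data: script {line}')
--     return 'event: datastar-execute-script\n' + '\n'.join(lines) + '\n\n'
-- ===== SOURCE B (Python) =====
-- def execute_script(
--     script: str,  # JavaScript to execute
--     auto_remove: bool = True  # remove script element after execution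
-- ) -> str:  # formatted SSE event string
--     "Format a datastar-execute-script SSE event"
--     block = 'data: script ' + script.replace('\n', '\ndata: script ')
--     prefix = '' if auto_remove else 'data: autoRemove false\n'
--     return 'event: datastar-execute-script\n' + prefix + block + '\n\n'
-- ===== Notes on version B (the rewrite author's own statement) =====
-- stated objective: simpler
-- what changed: Replaces the list-accumulator split/loop/join pipeline with a single str.replace that rewrites each newline into a newline followed by the per-line data prefix, assembling the event by plain string concatenation.
import Mathlib
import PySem

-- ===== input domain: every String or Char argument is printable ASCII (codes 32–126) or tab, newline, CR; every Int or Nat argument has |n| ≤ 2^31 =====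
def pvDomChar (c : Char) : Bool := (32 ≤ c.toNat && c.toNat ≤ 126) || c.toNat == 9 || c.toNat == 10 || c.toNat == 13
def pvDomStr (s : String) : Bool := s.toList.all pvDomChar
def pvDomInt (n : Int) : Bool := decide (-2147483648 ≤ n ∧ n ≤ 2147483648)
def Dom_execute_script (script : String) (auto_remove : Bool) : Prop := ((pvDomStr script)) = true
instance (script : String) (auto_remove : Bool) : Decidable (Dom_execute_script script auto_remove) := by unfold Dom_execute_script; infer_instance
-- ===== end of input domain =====

-- B formats the script block with one str.replace on newlines instead of A's split/loop/join list pipeline (objective: simpler).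

-- ===== PORT A =====
def execute_script (script : String) (auto_remove : Bool) : String :=
  let lines : List String := if auto_remove then [] else ["data: autoRemove false"]
  -- script.split('\n'): the separator is nonempty, so split? always returns some
  let parts : List String := (PySem.Str.split? script "\n").getD []
  let lines : List String := parts.foldl (fun acc line => acc ++ ["data: script " ++ line]) lines
  "event: datastar-execute-script\n" ++ PySem.Str.join "\n" lines ++ "\n\n"

-- ===== PORT B =====
def execute_script_alt (script : String) (auto_remove : Bool) : String :=
  let block : String := "data: script " ++ PySem.Str.replace script "\n" "\ndata: script "
  let prefix_ : String := if auto_remove then "" else "data: autoRemove false\n"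
  "event: datastar-execute-script\n" ++ prefix_ ++ block ++ "\n\n"

-- ===== PRECONDITION & SPEC =====
def Spec_execute_script (script : String) (auto_remove : Bool) (out : String) : Prop := out = execute_script_alt script auto_remove
instance (script : String) (auto_remove : Bool) (out : String) : Decidable (Spec_execute_script script auto_remove out) := by unfold Spec_execute_script; infer_instance

-- ===== CLAIM (what is proved, stated in full; the proofs are below) =====
def Claim_equal_execute_script : Prop := ∀ (script : String) (auto_remove : Bool), Dom_execute_script script auto_remove → Spec_execute_script script auto_remove (execute_script script auto_remove)

-- ===== LEMMAS AND PROOFS =====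

-- splitOn.go prepends its accumulator (reversed) to the result of the empty-accumulator run
theorem pv_splitOn_go_acc (sep : List Char) :
    ∀ (fuel : Nat) (l cur : List Char) (acc : List (List Char)),
      PySem.Chars.splitOn.go sep fuel l cur acc = acc.reverse ++ PySem.Chars.splitOn.go sep fuel l cur [] := by
  intro fuel
  induction fuel with
  | zero => intro l cur acc; rw [PySem.Chars.splitOn.go, PySem.Chars.splitOn.go]; simp
  | succ f ih =>
    intro l cur acc
    cases l with
    | nil =>
      rw [PySem.Chars.splitOn.go, PySem.Chars.splitOn.go] <;> simp
    | cons c t =>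
      rw [PySem.Chars.splitOn.go]
      conv_rhs => rw [PySem.Chars.splitOn.go]
      by_cases h : sep.isPrefixOf (c::t) = true
      · simp only [h, if_true]
        rw [ih _ _ (cur.reverse :: acc), ih _ _ (cur.reverse :: [])]
        simp
      · simp only [h]
        exact ih _ _ acc

-- splitOn.go never returns the empty list
theorem pv_splitOn_go_ne_nil (sep : List Char) :
    ∀ (fuel : Nat) (l cur : List Char), PySem.Chars.splitOn.go sep fuel l cur [] ≠ [] := by
  intro fuel
  induction fuel with
  | zero => intro l cur; rw [PySem.Chars.splitOn.go]; simp
  | succ f ih =>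
    intro l cur
    cases l with
    | nil => rw [PySem.Chars.splitOn.go] <;> simp
    | cons c t =>
      rw [PySem.Chars.splitOn.go]
      by_cases h : sep.isPrefixOf (c::t) = true
      · simp only [h, if_true]
        rw [pv_splitOn_go_acc]
        simp
      · simp only [h]
        exact ih _ _

-- replace.go prepends its accumulator (reversed) to the result of the empty-accumulator run
theorem pv_replace_go_acc (old new : List Char) :
    ∀ (fuel : Nat) (l acc : List Char),
      PySem.Chars.replace.go old new fuel l acc = acc.reverse ++ PySem.Chars.replace.go old new fuel l [] := by
  intro fuel
  induction fuel with
  | zero => intro l acc; rw [PySem.Chars.replace.go, PySem.Chars.replace.go]; simp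
  | succ f ih =>
    intro l acc
    cases l with
    | nil => rw [PySem.Chars.replace.go, PySem.Chars.replace.go] <;> simp
    | cons c t =>
      rw [PySem.Chars.replace.go]
      conv_rhs => rw [PySem.Chars.replace.go]
      by_cases h : old.isPrefixOf (c::t) = true
      · simp only [h, if_true]
        rw [ih _ (new.reverse ++ acc), ih _ (new.reverse ++ [])]
        simp
      · simp only [h]
        rw [ih _ (c :: acc), ih _ (c :: [])]
        simp

-- join over a nonempty mapped tail
theorem pv_join_cons (sep r : List Char) (f : List Char → List Char) (M : List (List Char)) (h : M ≠ []) :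
    PySem.Chars.join sep (List.map f (r :: M)) = f r ++ sep ++ PySem.Chars.join sep (List.map f M) := by
  cases M with
  | nil => exact absurd rfl h
  | cons m t => simp [PySem.Chars.join_cons_cons, List.append_assoc]

-- Main invariant: joining the prefixed split pieces equals prefix ++ replace with sep↦sep++pre
theorem pv_main (sep pre : List Char) (hsep : sep ≠ []) :
    ∀ (fuel : Nat) (l cur : List Char), l.length ≤ fuel →
      PySem.Chars.join sep (List.map (fun p => pre ++ p) (PySem.Chars.splitOn.go sep (fuel+1) l cur [])) =
        pre ++ cur.reverse ++ PySem.Chars.replace.go sep (sep ++ pre) fuel l [] := by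
  intro fuel
  induction fuel with
  | zero =>
    intro l cur hl
    have hl0 : l = [] := List.eq_nil_of_length_eq_zero (Nat.le_zero.mp hl)
    subst hl0
    rw [PySem.Chars.splitOn.go, PySem.Chars.replace.go] <;> simp [PySem.Chars.join_singleton]
  | succ f ih =>
    intro l cur hl
    cases l with
    | nil =>
      rw [PySem.Chars.splitOn.go, PySem.Chars.replace.go] <;> simp [PySem.Chars.join_singleton]
    | cons c t =>
      rw [PySem.Chars.splitOn.go]
      rw [PySem.Chars.replace.go]
      by_cases h : sep.isPrefixOf (c::t) = true
      · simp only [h, if_true]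
        rw [pv_splitOn_go_acc]
        simp only [List.reverse_cons, List.reverse_nil, List.nil_append, List.singleton_append]
        rw [pv_join_cons sep cur.reverse _ _ (pv_splitOn_go_ne_nil sep _ _ _)]
        have hdrop : (List.drop sep.length (c::t)).length ≤ f := by
          have : 1 ≤ sep.length := by
            cases sep with
            | nil => exact absurd rfl hsep
            | cons a b => simp
          simp only [List.length_drop, List.length_cons]
          simp only [List.length_cons] at hl
          omega
        rw [ih _ [] hdrop]
        conv_rhs => rw [pv_replace_go_acc]
        simp
      · simp only [h, Bool.false_eq_true, if_false]
        have ht : t.length ≤ f := by simpa using Nat.le_of_succ_le_succ (by simpa using hl)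
        rw [ih t (c :: cur) ht]
        rw [pv_replace_go_acc sep (sep ++ pre) f t [c]]
        simp

-- ===== VERDICT (by name: the statement is the Claim_ definition above) =====
theorem execute_script_spec : Claim_equal_execute_script := by
  intro script auto_remove _
  unfold Spec_execute_script execute_script execute_script_alt
  apply String.toList_inj.mp
  simp only [PySem.Str.split?, PySem.Chars.split?, PySem.Str.join, PySem.Str.replace]
  simp only [PySem.List.foldl_append_singleton_eq_map]
  have h := pv_main ['\n'] "data: script ".toList (by decide) script.toList.length script.toList [] (Nat.le_refl _)
  obtain ⟨p0, ps, hp⟩ : ∃ p0 ps, PySem.Chars.splitOn script.toList ['\n'] = p0 :: ps := by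
    cases hP : PySem.Chars.splitOn script.toList ['\n'] with
    | nil => exact absurd hP (by rw [PySem.Chars.splitOn]; exact pv_splitOn_go_ne_nil _ _ _ _)
    | cons a b => exact ⟨a, b, rfl⟩
  rw [PySem.Chars.splitOn] at hp
  cases auto_remove <;>
      simp only [Bool.false_eq_true, if_true]
  · -- auto_remove = false: the autoRemove line is joined in front of the script block
    simp [PySem.Chars.replace, List.map_map, Function.comp_def, String.toList_append]
    rw [PySem.Chars.splitOn]
    rw [show script.length = script.toList.length from (String.length_toList).symm]
    rw [hp] at h ⊢
    simp only [List.map_cons, PySem.Chars.join_cons_cons] at h ⊢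
    simpa using congrArg (fun z => ('d' :: 'a' :: 't' :: 'a' :: ':' :: ' ' :: 'a' :: 'u' :: 't' :: 'o' :: 'R' :: 'e' :: 'm' :: 'o' :: 'v' :: 'e' :: ' ' :: 'f' :: 'a' :: 'l' :: 's' :: 'e' :: '\n' :: z) ++ ['\n','\n']) h
  · -- auto_remove = true: the block alone
    simp [PySem.Chars.replace, List.map_map, Function.comp_def, String.toList_append]
    rw [PySem.Chars.splitOn]
    rw [show script.length = script.toList.length from (String.length_toList).symm]
    simpa using congrArg (· ++ ['\n','\n']) h
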